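-- pv_equiv track=rewrite | github.com/dcaguiar/PaP | lab03/lista_python_funcional.py | q17
-- ===== SOURCE A (Python) =====
-- from typing import List, Tuple, Any
--
-- def _is_consonant(ch: str) -> bool:
--     return ch.isalpha() and ch.lower() not in "aeiou"
--
-- def q17(dic: List[str], cons_seq: str) -> List[str]:
--     "Questão 17: matches - retorna palavras do dicionário cuja sequência de consoantes == cons_seq"
--     def _chars(word: str, i: int) -> List[str]:
--         if i >= len(word):
--             return []
--         rest = _chars(word, i+1)
--         return ([word[i]] if _is_consonant(word[i]) else []) + rest if False else ([] if not _is_consonant(word[i]) else [word[i]] + rest)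
--     # mais direta sem complicar: construir consonant string por recursão
--     def _consonants_str(word: str, i: int) -> str:
--         if i >= len(word):
--             return ''
--         ch = word[i]
--         return (ch + _consonants_str(word, i+1)) if _is_consonant(ch) else _consonants_str(word, i+1)
--     def _check_word(w: str) -> bool:
--         return _consonants_str(w, 0) == cons_seq
--     if not dic:
--         return []
--     head = dic[0]
--     tail = dic[1:]
--     if _check_word(head):
--         return [head] + q17(tail, cons_seq)
--     else:
--         return q17(tail, cons_seq)
-- ===== SOURCE B (Python) =====
-- def _is_consonant(ch: str) -> bool:
--     return ch.isalpha() and ch.lower() not in "aeiou"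
--
-- def q17(dic, cons_seq):
--     out = []
--     for word in dic:
--         if ''.join(c for c in word if _is_consonant(c)) == cons_seq:
--             out.append(word)
--     return out
-- ===== Notes on version B (the rewrite author's own statement) =====
-- stated objective: simpler
-- what changed: Replaces A's double recursion (recursion over the word's characters to build the consonant string, and list recursion with dic[1:] slicing to filter) with a single flat loop over the dictionary using a join-of-filtered-characters per word.
import Mathlib
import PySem

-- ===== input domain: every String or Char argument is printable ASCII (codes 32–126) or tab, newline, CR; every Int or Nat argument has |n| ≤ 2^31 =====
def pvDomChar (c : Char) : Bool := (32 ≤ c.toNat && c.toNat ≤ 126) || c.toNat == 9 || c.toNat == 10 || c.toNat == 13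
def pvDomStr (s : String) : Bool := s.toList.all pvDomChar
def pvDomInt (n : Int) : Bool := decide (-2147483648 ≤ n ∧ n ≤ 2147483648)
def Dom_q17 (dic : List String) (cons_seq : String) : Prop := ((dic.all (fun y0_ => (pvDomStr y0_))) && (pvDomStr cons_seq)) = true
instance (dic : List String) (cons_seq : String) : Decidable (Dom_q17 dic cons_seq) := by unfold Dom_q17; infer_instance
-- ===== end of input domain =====

-- B replaces A's double recursion with one flat filter pass per word; objective: simpler.

-- ===== PORT A =====
-- shared module-level helper _is_consonant (used verbatim by both Pythons)
def isConsonant (ch : Char) : Bool :=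
  PySem.Chars.isalpha ch && !(("aeiou".toList).contains (PySem.Chars.lowerChar ch))

-- _consonants_str: index recursion over the word, transliterated as recursion on the char list
def consStrA : List Char → List Char
  | [] => []
  | ch :: rest => if isConsonant ch then ch :: consStrA rest else consStrA rest

def q17 (dic : List String) (cons_seq : String) : List String :=
  match dic with
  | [] => []
  | head :: tail =>
      if String.mk (consStrA head.toList) == cons_seq then
        head :: q17 tail cons_seq
      else
        q17 tail cons_seq

-- ===== PORT B =====
def q17_alt (dic : List String) (cons_seq : String) : List String :=
  dic.foldl (fun out word =>
    if String.mk (word.toList.filter isConsonant) == cons_seq then out ++ [word] else out) []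

-- ===== PRECONDITION & SPEC =====
def Spec_q17 (dic : List String) (cons_seq : String) (out : List String) : Prop := out = q17_alt dic cons_seq
instance (dic : List String) (cons_seq : String) (out : List String) : Decidable (Spec_q17 dic cons_seq out) := by unfold Spec_q17; infer_instance

-- ===== CLAIM (what is proved, stated in full; the proofs are below) =====
def Claim_equal_q17 : Prop := ∀ (dic : List String) (cons_seq : String), Dom_q17 dic cons_seq → Spec_q17 dic cons_seq (q17 dic cons_seq)

-- ===== LEMMAS AND PROOFS =====
theorem consStrA_eq_filter (l : List Char) : consStrA l = l.filter isConsonant := by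
  induction l with
  | nil => rfl
  | cons c rest ih => simp [consStrA, List.filter, ih]; split_ifs <;> simp_all

theorem q17_eq_filter (dic : List String) (cons_seq : String) :
    q17 dic cons_seq = dic.filter (fun w => String.mk (w.toList.filter isConsonant) == cons_seq) := by
  induction dic with
  | nil => rfl
  | cons h t ih =>
      simp only [q17, consStrA_eq_filter, ih, List.filter]
      cases hb : (String.mk (h.toList.filter isConsonant) == cons_seq) <;> simp

-- ===== VERDICT (by name: the statement is the Claim_ definition above) =====
theorem q17_spec : Claim_equal_q17 := by
  intro dic cons_seq _
  unfold Spec_q17 q17_alt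
  rw [PySem.List.foldl_append_if_eq_filter, q17_eq_filter, List.nil_append]
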